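-- pv_equiv track=rewrite | github.com/lemora/msa-proteoform-profiler | src/msapp/model/domains.py | blist_to_region_tuples
-- ===== SOURCE A (Python) =====
-- def blist_to_region_tuples(binary_list: list):
--     """Turns a list with binary values into a list of tuples denoting black regions (start, end)."""
--     black_regions = []
--     start = None
--
--     for i, value in enumerate(binary_list):
--         if value == 0 and start is None:
--             start = i
--         elif value == 1 and start is not None:
--             black_regions.append((start, i - 1))
--             start = None
--
--     if start is not None:
--         black_regions.append((start, len(binary_list) - 1))
--
--     return black_regions
-- ===== SOURCE B (Python) =====
-- def blist_to_region_tuples(binary_list: list):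
--     """Turns a list with binary values into a list of tuples denoting black regions (start, end)."""
--     n = len(binary_list)
--     ones = [i for i, v in enumerate(binary_list) if v == 1]
--     black_regions = []
--     lo = 0
--     for hi in ones + [n]:
--         for j in range(lo, hi):
--             if binary_list[j] == 0:
--                 black_regions.append((j, hi - 1))
--                 break
--         lo = hi + 1
--     return black_regions
-- ===== Notes on version B (the rewrite author's own statement) =====
-- stated objective: alternative
-- what changed: Replaces A's single stateful pass with a start flag by a separator decomposition: collect the indices of all 1s, split the list into the segments between them, and emit (first zero of the segment, segment end) for each segment containing a zero.
import Mathlib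
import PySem

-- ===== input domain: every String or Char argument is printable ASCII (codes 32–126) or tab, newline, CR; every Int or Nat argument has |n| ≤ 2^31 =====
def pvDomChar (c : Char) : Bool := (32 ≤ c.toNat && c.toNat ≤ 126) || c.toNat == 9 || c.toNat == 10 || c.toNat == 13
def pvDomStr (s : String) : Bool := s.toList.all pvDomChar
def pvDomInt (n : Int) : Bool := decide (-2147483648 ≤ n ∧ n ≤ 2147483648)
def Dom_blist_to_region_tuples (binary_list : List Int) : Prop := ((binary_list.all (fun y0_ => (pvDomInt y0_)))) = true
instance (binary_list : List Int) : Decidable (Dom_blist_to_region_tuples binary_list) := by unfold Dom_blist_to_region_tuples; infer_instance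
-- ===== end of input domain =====

-- B replaces A's single stateful pass (start flag) by a separator decomposition:
-- indices of 1s split the list into segments, each emitting (first zero, segment end).

-- ===== PORT A =====
-- loop body of A's for over enumerate(binary_list); state = (black_regions, start)
def pvAStep (st : List (Int × Int) × Option Int) (p : Int × Int) : List (Int × Int) × Option Int :=
  if p.2 = 0 ∧ st.2 = none then (st.1, some p.1)
  else if p.2 = 1 ∧ st.2 ≠ none then (st.1 ++ [(st.2.getD 0, p.1 - 1)], none)
  else st

def blist_to_region_tuples (binary_list : List Int) : List (Int × Int) :=
  let st := (PySem.List.enumerate binary_list 0).foldl pvAStep ([], none)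
  match st.2 with
  | some s => st.1 ++ [(s, (binary_list.length : Int) - 1)]
  | none => st.1

-- ===== PORT B =====
-- inner 'for j in range(lo, hi): if binary_list[j] == 0: …; break' = first zero index in [lo, hi)
def pvFirstZero (bl : List Int) (lo hi : Int) : Option Int :=
  (PySem.List.pyRange lo hi 1).find? (fun j => PySem.List.pyGet? bl j == some 0)

-- loop body of B's for over ones + [n]; state = (black_regions, lo)
def pvBStep (bl : List Int) (st : List (Int × Int) × Int) (hi : Int) : List (Int × Int) × Int :=
  match pvFirstZero bl st.2 hi with
  | some j => (st.1 ++ [(j, hi - 1)], hi + 1)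
  | none => (st.1, hi + 1)

def blist_to_region_tuples_alt (binary_list : List Int) : List (Int × Int) :=
  let n : Int := binary_list.length
  let ones := (PySem.List.enumerate binary_list 0).filterMap
    (fun p => if p.2 = 1 then some p.1 else none)
  ((ones ++ [n]).foldl (pvBStep binary_list) ([], 0)).1

-- ===== PRECONDITION & SPEC =====
def Spec_blist_to_region_tuples (binary_list : List Int) (out : List (Int × Int)) : Prop := out = blist_to_region_tuples_alt binary_list
instance (binary_list : List Int) (out : List (Int × Int)) : Decidable (Spec_blist_to_region_tuples binary_list out) := by unfold Spec_blist_to_region_tuples; infer_instance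

-- ===== CLAIM (what is proved, stated in full; the proofs are below) =====
def Claim_equal_blist_to_region_tuples : Prop := ∀ (binary_list : List Int), Dom_blist_to_region_tuples binary_list → Spec_blist_to_region_tuples binary_list (blist_to_region_tuples binary_list)

-- ===== LEMMAS AND PROOFS =====

-- common reference recursion: regions of the suffix l starting at absolute index i, mode st
def pvSpecGo (l : List Int) (i : Nat) (st : Option Nat) : List (Int × Int) :=
  match l, st with
  | [], some s => [((s : Int), (i : Int) - 1)]
  | [], none => []
  | v :: t, none => if v = 0 then pvSpecGo t (i+1) (some i) else pvSpecGo t (i+1) none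
  | v :: t, some s =>
      if v = 1 then ((s : Int), (i : Int) - 1) :: pvSpecGo t (i+1) none
      else pvSpecGo t (i+1) (some s)

theorem pvFZ_none (bl : List Int) (lo hi : Nat)
    (h : ∀ j : Nat, lo ≤ j → j < hi → bl[j]? ≠ some 0) :
    pvFirstZero bl (lo : Int) (hi : Int) = none := by
  unfold pvFirstZero
  rw [List.find?_eq_none]
  intro x hx
  rw [PySem.List.mem_pyRange_one] at hx
  have hx0 : 0 ≤ x := le_trans (by positivity) hx.1
  have hxe : x = (x.toNat : Int) := (Int.toNat_of_nonneg hx0).symm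
  rw [hxe, PySem.List.pyGet?_natCast]
  simpa using h x.toNat (by omega) (by omega)

theorem pvFZ_some (bl : List Int) (lo hi s : Nat) (h1 : lo ≤ s) (h2 : s < hi)
    (h3 : bl[s]? = some 0) (h4 : ∀ j : Nat, lo ≤ j → j < s → bl[j]? ≠ some 0) :
    pvFirstZero bl (lo : Int) (hi : Int) = some (s : Int) := by
  unfold pvFirstZero
  rw [PySem.List.pyRange_one_append (lo:Int) (s:Int) (hi:Int) (by omega) (by omega),
      List.find?_append]
  have hnone : (PySem.List.pyRange (lo:Int) (s:Int) 1).find?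
      (fun j => PySem.List.pyGet? bl j == some 0) = none := by
    rw [List.find?_eq_none]
    intro x hx
    rw [PySem.List.mem_pyRange_one] at hx
    have hx0 : 0 ≤ x := le_trans (by positivity) hx.1
    have hxe : x = (x.toNat : Int) := (Int.toNat_of_nonneg hx0).symm
    rw [hxe, PySem.List.pyGet?_natCast]
    simpa using h4 x.toNat (by omega) (by omega)
  rw [hnone, PySem.List.pyRange_one_cons (by exact_mod_cast h2)]
  simp [PySem.List.pyGet?_natCast, h3]
theorem pvAStep_none_zero (regs : List (Int × Int)) (i v : Int) (h : v = 0) :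
    pvAStep (regs, none) (i, v) = (regs, some i) := by simp [pvAStep, h]
theorem pvAStep_none_nz (regs : List (Int × Int)) (i v : Int) (h : v ≠ 0) :
    pvAStep (regs, none) (i, v) = (regs, none) := by simp [pvAStep, h]
theorem pvAStep_some_one (regs : List (Int × Int)) (s i v : Int) (h : v = 1) :
    pvAStep (regs, some s) (i, v) = (regs ++ [(s, i - 1)], none) := by simp [pvAStep, h]
theorem pvAStep_some_no (regs : List (Int × Int)) (s i v : Int) (h : v ≠ 1) :
    pvAStep (regs, some s) (i, v) = (regs, some s) := by simp [pvAStep, h]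

theorem pvA_fold (l : List Int) (i : Nat) (regs : List (Int × Int)) (st : Option Nat) :
    (let r := (PySem.List.enumerate l (i : Int)).foldl pvAStep (regs, st.map (Int.ofNat));
     match r.2 with
     | some s => r.1 ++ [(s, ((i + l.length : Nat) : Int) - 1)]
     | none => r.1)
    = regs ++ pvSpecGo l i st := by
  induction l generalizing i regs st with
  | nil =>
      cases st <;> simp [PySem.List.enumerate_nil, pvSpecGo]
  | cons v t ih =>
      rw [PySem.List.enumerate_cons]
      have hcast : ((i:Int)+1) = ((i+1:Nat):Int) := by push_cast; ring
      have hlen : (i + (v::t).length : Nat) = ((i+1) + t.length : Nat) := by simp; omega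
      rw [hlen]
      cases st with
      | none =>
          simp only [Option.map_none]
          by_cases h0 : v = 0
          · rw [List.foldl_cons, pvAStep_none_zero _ _ _ h0, hcast]
            have := ih (i+1) regs (some i)
            simp only [Option.map_some, Int.ofNat_eq_natCast] at this
            rw [this]
            simp [pvSpecGo, h0]
          · rw [List.foldl_cons, pvAStep_none_nz _ _ _ h0, hcast]
            have := ih (i+1) regs none
            simp only [Option.map_none] at this
            rw [this]
            simp [pvSpecGo, h0]
      | some s =>
          simp only [Option.map_some, Int.ofNat_eq_natCast]
          by_cases h1 : v = 1
          · rw [List.foldl_cons, pvAStep_some_one _ _ _ _ h1, hcast]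
            have := ih (i+1) (regs ++ [((s:Int), (i:Int)-1)]) none
            simp only [Option.map_none] at this
            rw [this]
            simp [pvSpecGo, h1]
          · rw [List.foldl_cons, pvAStep_some_no _ _ _ _ h1, hcast]
            have := ih (i+1) regs (some s)
            simp only [Option.map_some, Int.ofNat_eq_natCast] at this
            rw [this]
            simp [pvSpecGo, h1]

theorem pvB_fold (bl : List Int) (l : List Int) (i lo : Nat) (regs : List (Int × Int)) (st : Option Nat)
    (hdrop : l = bl.drop i) (hile : i ≤ bl.length)
    (hinv : match st with
      | none => lo ≤ i ∧ ∀ j : Nat, lo ≤ j → j < i → bl[j]? ≠ some 0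
      | some s => lo ≤ s ∧ s < i ∧ bl[s]? = some 0 ∧ ∀ j : Nat, lo ≤ j → j < s → bl[j]? ≠ some 0) :
    ((((PySem.List.enumerate l (i : Int)).filterMap
        (fun p => if p.2 = 1 then some p.1 else none) ++ [(bl.length : Int)]).foldl
        (pvBStep bl) (regs, (lo : Int))).1)
    = regs ++ pvSpecGo l i st := by
  induction l generalizing i lo regs st with
  | nil =>
      have hlen : i = bl.length := by
        have := congrArg List.length hdrop
        simp [List.length_drop] at this
        omega
      simp only [PySem.List.enumerate_nil, List.filterMap_nil, List.nil_append,
        List.foldl_cons, List.foldl_nil]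
      cases st with
      | none =>
          rw [show (regs, (lo:Int)) = (regs, (lo:Int)) from rfl]
          have : pvBStep bl (regs, (lo:Int)) (bl.length : Int) = (regs, (bl.length:Int) + 1) := by
            unfold pvBStep
            rw [pvFZ_none bl lo bl.length (fun j hj1 hj2 => hinv.2 j hj1 (by omega))]
          rw [this]
          simp [pvSpecGo]
      | some s =>
          obtain ⟨h1, h2, h3, h4⟩ := hinv
          have : pvBStep bl (regs, (lo:Int)) (bl.length : Int) =
              (regs ++ [((s:Int), (bl.length:Int) - 1)], (bl.length:Int) + 1) := by
            unfold pvBStep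
            rw [pvFZ_some bl lo bl.length s h1 (by omega) h3 h4]
          rw [this]
          simp [pvSpecGo, hlen]
  | cons v t ih =>
      have hi' : i < bl.length := by
        by_contra h
        rw [List.drop_eq_nil_of_le (by omega)] at hdrop
        simp at hdrop
      have hv : bl[i]? = some v := by
        have h0 : (bl.drop i)[0]? = some v := by rw [← hdrop]; rfl
        rwa [List.getElem?_drop, Nat.add_zero] at h0
      have ht : t = bl.drop (i+1) := by
        have := congrArg (List.drop 1) hdrop
        simpa [List.drop_drop, Nat.add_comm] using this
      rw [PySem.List.enumerate_cons]
      have hcast : ((i:Int)+1) = ((i+1:Nat):Int) := by push_cast; ring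
      by_cases h1 : v = 1
      · simp only [List.filterMap_cons, h1, reduceIte]
        rw [List.cons_append, List.foldl_cons]
        cases st with
        | none =>
            have hstep : pvBStep bl (regs, (lo:Int)) (i : Int) = (regs, (i:Int) + 1) := by
              unfold pvBStep
              rw [pvFZ_none bl lo i hinv.2]
            rw [hstep, hcast]
            rw [ih (i+1) (i+1) regs none ht (by omega) ⟨le_refl _, fun j hj1 hj2 => by omega⟩]
            simp [pvSpecGo]
        | some s =>
            obtain ⟨ha, hb, hc, hd⟩ := hinv
            have hstep : pvBStep bl (regs, (lo:Int)) (i : Int) =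
                (regs ++ [((s:Int), (i:Int) - 1)], (i:Int) + 1) := by
              unfold pvBStep
              rw [pvFZ_some bl lo i s ha hb hc hd]
            rw [hstep, hcast]
            rw [ih (i+1) (i+1) (regs ++ [((s:Int), (i:Int)-1)]) none ht (by omega)
              ⟨le_refl _, fun j hj1 hj2 => by omega⟩]
            simp [pvSpecGo, List.append_assoc]
      · simp only [List.filterMap_cons, if_neg h1]
        rw [hcast]
        cases st with
        | none =>
            obtain ⟨ha, hb⟩ := hinv
            by_cases h0 : v = 0
            · rw [ih (i+1) lo regs (some i) ht (by omega) ⟨ha, by omega, by rw [hv, h0], hb⟩]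
              simp [pvSpecGo, h0]
            · rw [ih (i+1) lo regs none ht (by omega) ⟨by omega, fun j hj1 hj2 => by
                rcases Nat.lt_or_ge j i with h | h
                · exact hb j hj1 h
                · have : j = i := by omega
                  rw [this, hv]
                  simp [h0]⟩]
              simp [pvSpecGo, h0]
        | some s =>
            obtain ⟨ha, hb, hc, hd⟩ := hinv
            rw [ih (i+1) lo regs (some s) ht (by omega) ⟨ha, by omega, hc, hd⟩]
            simp [pvSpecGo, h1]

theorem pvA_eq (bl : List Int) : blist_to_region_tuples bl = pvSpecGo bl 0 none := by
  have h := pvA_fold bl 0 [] none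
  simpa [blist_to_region_tuples] using h

theorem pvB_eq (bl : List Int) : blist_to_region_tuples_alt bl = pvSpecGo bl 0 none := by
  have h := pvB_fold bl bl 0 0 [] none rfl (by omega)
    ⟨le_refl 0, fun j h1 h2 => by omega⟩
  simpa [blist_to_region_tuples_alt] using h

-- ===== VERDICT (by name: the statement is the Claim_ definition above) =====
theorem blist_to_region_tuples_spec : Claim_equal_blist_to_region_tuples := by
  intro bl _
  unfold Spec_blist_to_region_tuples
  rw [pvA_eq, pvB_eq]
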